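-- pv_equiv track=rewrite | github.com/giuliadellarovere/Fondamenti-Dell-Informatica | FunzioniPrimitiveRicorsive.py | is_sum_of_two_perfect_cubes
-- ===== SOURCE A (Python) =====
-- def pow(x, y):
--     if(y == 0):
--         return 1;
--     else:
--         return ( x * pow(x, y - 1) );
--
-- def is_sum_of_two_perfect_cubes(x):
--     if(x < 0):
--         return 0; # la somma di due cubi perfetti è non negativa
--     for y in range(0, x + 1): # y è il primo cubo perfetto
--         for z in range(0, x + 1): # z è il secondo cubo perfetto
--             if(pow(y, 3) + pow(z, 3) == x):
--                 return 1; # x è ottenibile come somma di due cubi perfetti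
--     return 0; # x non è ottenibile come somma di due cubi perfetti
-- ===== SOURCE B (Python) =====
-- def is_sum_of_two_perfect_cubes(x):
--     if x < 0:
--         return 0
--     cubes = []
--     y = 0
--     while y * y * y <= x:
--         cubes.append(y * y * y)
--         y += 1
--     cube_set = set(cubes)
--     for c in cubes:
--         if x - c in cube_set:
--             return 1
--     return 0
-- ===== Notes on version B (the rewrite author's own statement) =====
-- stated objective: faster
-- what changed: Replaces the double scan over all pairs 0..x with a single enumeration of the O(x^(1/3)) cubes not exceeding x and a set-membership test of each complement.
import Mathlib
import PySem

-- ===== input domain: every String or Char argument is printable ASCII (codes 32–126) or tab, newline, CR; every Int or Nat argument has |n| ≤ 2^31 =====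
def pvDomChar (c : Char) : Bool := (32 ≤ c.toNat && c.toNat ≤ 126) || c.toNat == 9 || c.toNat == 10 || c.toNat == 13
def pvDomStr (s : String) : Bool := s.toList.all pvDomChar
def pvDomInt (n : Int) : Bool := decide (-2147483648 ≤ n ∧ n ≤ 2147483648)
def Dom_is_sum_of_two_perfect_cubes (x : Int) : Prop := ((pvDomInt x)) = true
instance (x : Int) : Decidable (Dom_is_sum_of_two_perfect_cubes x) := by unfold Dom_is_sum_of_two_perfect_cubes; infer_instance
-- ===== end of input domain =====

-- B enumerates only the cubes ≤ x and tests each complement against a set of them (faster); A scans all pairs in [0,x]².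

-- ===== PORT A =====
-- the module's recursive pow(x, y); the '≤' guard only makes the recursion total
-- (Python never terminates for y < 0; A calls it with y = 3 only)
def pyPow (x y : Int) : Int :=
  if y ≤ 0 then 1 else x * pyPow x (y - 1)
termination_by y.toNat
decreasing_by omega

def is_sum_of_two_perfect_cubes (x : Int) : Int :=
  if x < 0 then 0
  else if (PySem.List.pyRange 0 (x + 1) 1).any (fun y =>
            (PySem.List.pyRange 0 (x + 1) 1).any (fun z =>
              pyPow y 3 + pyPow z 3 == x))
       then 1 else 0

-- ===== PORT B =====
-- the 'while y*y*y <= x' loop collecting cubes; the '0 ≤ y' conjunct only makes the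
-- recursion total (the loop starts at y = 0 and y only increases)
def cubesFrom (x y : Int) : List Int :=
  if 0 ≤ y ∧ y * y * y ≤ x then (y * y * y) :: cubesFrom x (y + 1) else []
termination_by (x + 1 - y).toNat
decreasing_by
  rename_i h; rcases h with ⟨hy, hc⟩
  have hyx : y ≤ x := by
    rcases eq_or_lt_of_le hy with rfl | hpos
    · omega
    · nlinarith
  omega

def is_sum_of_two_perfect_cubes_alt (x : Int) : Int :=
  if x < 0 then 0
  else
    let cubes := cubesFrom x 0
    let cubeSet : PySem.Set Int := PySem.Set.ofList cubes
    if cubes.any (fun c => PySem.Set.contains cubeSet (x - c)) then 1 else 0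

-- ===== PRECONDITION & SPEC =====
def Spec_is_sum_of_two_perfect_cubes (x : Int) (out : Int) : Prop := out = is_sum_of_two_perfect_cubes_alt x
instance (x : Int) (out : Int) : Decidable (Spec_is_sum_of_two_perfect_cubes x out) := by unfold Spec_is_sum_of_two_perfect_cubes; infer_instance

-- ===== CLAIM (what is proved, stated in full; the proofs are below) =====
def Claim_equal_is_sum_of_two_perfect_cubes : Prop := ∀ (x : Int), Dom_is_sum_of_two_perfect_cubes x → Spec_is_sum_of_two_perfect_cubes x (is_sum_of_two_perfect_cubes x)

-- ===== LEMMAS AND PROOFS =====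

theorem pyPow_three (x : Int) : pyPow x 3 = x * x * x := by
  rw [pyPow, pyPow, pyPow, pyPow]
  norm_num; ring

theorem mem_cubesFrom {x y c : Int} (hy : 0 ≤ y) :
    c ∈ cubesFrom x y ↔ ∃ t : Int, y ≤ t ∧ t * t * t ≤ x ∧ c = t * t * t := by
  induction y using cubesFrom.induct x with
  | case1 y h ih =>
    rw [cubesFrom, if_pos h, List.mem_cons, ih (by omega)]
    constructor
    · rintro (rfl | ⟨t, ht1, ht2, rfl⟩)
      · exact ⟨y, le_refl y, h.2, rfl⟩
      · exact ⟨t, by omega, ht2, rfl⟩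
    · rintro ⟨t, ht1, ht2, rfl⟩
      rcases eq_or_lt_of_le ht1 with rfl | hlt
      · exact Or.inl rfl
      · exact Or.inr ⟨t, by omega, ht2, rfl⟩
  | case2 y h =>
    rw [cubesFrom, if_neg h]
    simp only [List.not_mem_nil, false_iff]
    rintro ⟨t, ht1, ht2, rfl⟩
    have hyx : ¬ y * y * y ≤ x := fun hc => h ⟨hy, hc⟩
    have ht0 : 0 ≤ t := le_trans hy ht1
    have h1 : y * y ≤ t * t := mul_le_mul ht1 ht1 hy ht0
    have : y * y * y ≤ t * t * t := mul_le_mul h1 ht1 hy (mul_nonneg ht0 ht0)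
    omega

theorem cube_le_self {t x : Int} (ht : 0 ≤ t) (hx : 0 ≤ x) (h : t * t * t ≤ x) : t ≤ x := by
  rcases eq_or_lt_of_le ht with rfl | hpos
  · simpa using hx
  · nlinarith

theorem any_iff_any (x : Int) (hx : 0 ≤ x) :
    ((PySem.List.pyRange 0 (x + 1) 1).any (fun y =>
        (PySem.List.pyRange 0 (x + 1) 1).any (fun z =>
          pyPow y 3 + pyPow z 3 == x)) = true)
    ↔ ((cubesFrom x 0).any (fun c =>
        PySem.Set.contains (PySem.Set.ofList (cubesFrom x 0)) (x - c)) = true) := by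
  simp only [List.any_eq_true, PySem.List.mem_pyRange_one, pyPow_three,
    PySem.Set.contains, List.contains_iff_mem,
    PySem.Set.mem_ofList, beq_iff_eq]
  constructor
  · rintro ⟨y, ⟨hy0, _⟩, z, ⟨hz0, _⟩, hsum⟩
    refine ⟨y * y * y, ?_, ?_⟩
    · exact (mem_cubesFrom le_rfl).2 ⟨y, hy0, by nlinarith, rfl⟩
    · exact (mem_cubesFrom le_rfl).2 ⟨z, hz0, by nlinarith, by omega⟩
  · rintro ⟨c, hc, hcomp⟩
    obtain ⟨t, ht0, htx, rfl⟩ := (mem_cubesFrom le_rfl).1 hc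
    obtain ⟨s, hs0, hsx, hse⟩ := (mem_cubesFrom le_rfl).1 hcomp
    refine ⟨t, ⟨ht0, ?_⟩, s, ⟨hs0, ?_⟩, by omega⟩
    · have := cube_le_self ht0 hx htx; omega
    · have := cube_le_self hs0 hx hsx; omega

-- ===== VERDICT (by name: the statement is the Claim_ definition above) =====
theorem is_sum_of_two_perfect_cubes_spec : Claim_equal_is_sum_of_two_perfect_cubes := by
  intro x _
  unfold Spec_is_sum_of_two_perfect_cubes is_sum_of_two_perfect_cubes is_sum_of_two_perfect_cubes_alt
  by_cases hx : x < 0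
  · simp [hx]
  · rw [if_neg hx, if_neg hx]
    rcases (any_iff_any x (by omega)) with h
    by_cases hA : (PySem.List.pyRange 0 (x + 1) 1).any (fun y =>
        (PySem.List.pyRange 0 (x + 1) 1).any (fun z => pyPow y 3 + pyPow z 3 == x)) = true
    · rw [if_pos hA]; rw [if_pos (h.1 hA)]
    · rw [if_neg hA]
      rw [if_neg (fun hB => hA (h.2 hB))]
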